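-- pv_equiv track=rewrite | github.com/comrados/insyte-analytics | analytics/scripts/analysis_workload_stats.py | _count_on_off
-- ===== SOURCE A (Python) =====
-- def _count_on_off(cs):
--     """
--     counts switching of working modes
--     -1 or 0 -> 1 - on
--     1 or 0 -> -1 - off
--     1 or -1 -> 0 - neutral
--
--     :param cs: encoded values
--     :return:
--     """
--
--     c_on = 0
--     c_off = 0
--     c_neutral = 0
--
--     for i in range(len(cs) - 1):
--         if cs[i] != cs[i + 1]:
--             if cs[i + 1] == 1:
--                 c_on += 1
--             elif cs[i + 1] == -1:
--                 c_off += 1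
--             else:
--                 c_neutral += 1
--
--     return c_on, c_off, c_neutral
-- ===== SOURCE B (Python) =====
-- def _count_on_off(cs):
--     # collapse consecutive duplicates into runs; each run after the first is one switch
--     runs = []
--     for x in cs:
--         if not runs or runs[-1] != x:
--             runs.append(x)
--     tail = runs[1:]
--     freq = {}
--     for v in tail:
--         freq[v] = freq.get(v, 0) + 1
--     c_on = freq.get(1, 0)
--     c_off = freq.get(-1, 0)
--     return c_on, c_off, len(tail) - c_on - c_off
-- ===== Notes on version B (the rewrite author's own statement) =====
-- stated objective: alternative
-- what changed: Instead of a fused index loop with three branch counters, B first collapses the series into its run-length representation (consecutive duplicates removed), then aggregates the run-start values after the first into a frequency dictionary and reads off the three counts from it.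
import Mathlib
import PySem

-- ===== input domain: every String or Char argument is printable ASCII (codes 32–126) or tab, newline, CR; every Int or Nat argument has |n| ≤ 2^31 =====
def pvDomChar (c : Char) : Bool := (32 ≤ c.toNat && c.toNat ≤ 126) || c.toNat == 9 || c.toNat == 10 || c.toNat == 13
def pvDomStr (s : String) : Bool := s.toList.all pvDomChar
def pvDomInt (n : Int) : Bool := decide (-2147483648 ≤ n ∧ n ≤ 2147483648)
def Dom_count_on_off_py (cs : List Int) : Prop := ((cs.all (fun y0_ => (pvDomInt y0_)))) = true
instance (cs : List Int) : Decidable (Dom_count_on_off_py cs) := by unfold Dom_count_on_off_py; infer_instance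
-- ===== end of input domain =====

-- B collapses the series into its run-length representation first, then aggregates the
-- run starts after the first into a frequency dictionary; objective: alternative algorithm.

-- ===== PORT A =====
-- loop 'for i in range(len(cs)-1)'; indices i and i+1 are always in range there, so pyGetD with
-- default 0 is exact.
def count_on_off_py (cs : List Int) : Int × Int × Int :=
  (PySem.List.pyRange 0 ((cs.length : Int) - 1) 1).foldl
    (fun acc i =>
      if PySem.List.pyGetD cs i 0 ≠ PySem.List.pyGetD cs (i + 1) 0 then
        if PySem.List.pyGetD cs (i + 1) 0 = 1 then (acc.1 + 1, acc.2.1, acc.2.2)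
        else if PySem.List.pyGetD cs (i + 1) 0 = -1 then (acc.1, acc.2.1 + 1, acc.2.2)
        else (acc.1, acc.2.1, acc.2.2 + 1)
      else acc)
    (0, 0, 0)

-- ===== PORT B =====
-- 'runs[-1]' is read only when runs is nonempty, so getLast? = some x is exact there.
def count_on_off_py_alt (cs : List Int) : Int × Int × Int :=
  let runs := cs.foldl
    (fun runs x => if runs = [] ∨ ¬ (runs.getLast? = some x) then runs ++ [x] else runs) []
  let tail := PySem.List.slice runs (some 1) none
  let freq := tail.foldl (fun d v => d.insert v (d.getD v 0 + 1)) PySem.Dict.empty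
  let c_on := freq.getD 1 0
  let c_off := freq.getD (-1) 0
  (c_on, c_off, (tail.length : Int) - c_on - c_off)

-- ===== PRECONDITION & SPEC =====
def Spec_count_on_off_py (cs : List Int) (out : Int × Int × Int) : Prop := out = count_on_off_py_alt cs
instance (cs : List Int) (out : Int × Int × Int) : Decidable (Spec_count_on_off_py cs out) := by unfold Spec_count_on_off_py; infer_instance

-- ===== CLAIM (what is proved, stated in full; the proofs are below) =====
def Claim_equal_count_on_off_py : Prop := ∀ (cs : List Int), Dom_count_on_off_py cs → Spec_count_on_off_py cs (count_on_off_py cs)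

-- ===== LEMMAS AND PROOFS =====

-- A's index loop over range(len-1) is the fold over adjacent pairs.
theorem pv_loop_shift (g : Int × Int × Int → Int → Int → Int × Int × Int) :
    ∀ (n a : Nat) (cs : List Int) (init : Int × Int × Int), cs.length ≤ a + n →
      (PySem.List.pyRange (a : Int) ((cs.length : Int) - 1) 1).foldl
          (fun acc i => g acc (PySem.List.pyGetD cs i 0) (PySem.List.pyGetD cs (i + 1) 0)) init
        = ((cs.drop a).zip (cs.drop (a + 1))).foldl (fun acc p => g acc p.1 p.2) init := by
  intro n
  induction n with
  | zero =>
    intro a cs init h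
    rw [PySem.List.pyRange_one_eq_nil (by omega), List.drop_eq_nil_of_le (by omega)]
    simp
  | succ n ih =>
    intro a cs init h
    by_cases hlt : a + 1 < cs.length
    · have h1 : (a : Int) < (cs.length : Int) - 1 := by omega
      rw [PySem.List.pyRange_one_cons h1]
      have ha : a < cs.length := by omega
      rw [List.drop_eq_getElem_cons ha, List.drop_eq_getElem_cons hlt]
      simp only [List.zip_cons_cons, List.foldl_cons]
      have e1 : PySem.List.pyGetD cs ((a : Int)) 0 = cs[a] := by
        rw [PySem.List.pyGetD_natCast, List.getD_eq_getElem cs 0 ha]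
      have e2 : PySem.List.pyGetD cs ((a : Int) + 1) 0 = cs[a + 1] := by
        have : ((a : Int) + 1) = ((a + 1 : Nat) : Int) := by push_cast; ring
        rw [this, PySem.List.pyGetD_natCast, List.getD_eq_getElem cs 0 hlt]
      rw [e1, e2]
      have : ((a : Int) + 1) = ((a + 1 : Nat) : Int) := by push_cast; ring
      rw [this, ih (a + 1) cs _ (by omega), List.drop_eq_getElem_cons hlt]
    · rw [PySem.List.pyRange_one_eq_nil (by omega),
        List.drop_eq_nil_of_le (show cs.length ≤ a + 1 by omega)]
      simp

-- the transition targets of a pair list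
def pvTrans (ps : List (Int × Int)) : List Int :=
  ps.filterMap (fun p => if p.1 ≠ p.2 then some p.2 else none)

-- A's branch counters over a pair list compute counts over its transition targets.
theorem pv_fold_counts :
    ∀ (ps : List (Int × Int)) (x y z : Int),
      ps.foldl
          (fun acc p =>
            if p.1 ≠ p.2 then
              if p.2 = 1 then (acc.1 + 1, acc.2.1, acc.2.2)
              else if p.2 = -1 then (acc.1, acc.2.1 + 1, acc.2.2)
              else (acc.1, acc.2.1, acc.2.2 + 1)
            else acc)
          (x, y, z)
        = (x + ((pvTrans ps).count 1 : Int), y + ((pvTrans ps).count (-1) : Int),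
           z + ((pvTrans ps).length : Int) - ((pvTrans ps).count 1 : Int)
             - ((pvTrans ps).count (-1) : Int)) := by
  intro ps
  induction ps with
  | nil => intro x y z; simp [pvTrans]
  | cons p ps ih =>
    intro x y z
    by_cases hne : p.1 ≠ p.2
    · have ht : pvTrans (p :: ps) = p.2 :: pvTrans ps := by
        simp [pvTrans, hne]
      by_cases h1 : p.2 = 1
      · simp only [List.foldl_cons, if_pos hne, if_pos h1, ih, ht]
        simp only [List.count_cons, List.length_cons, h1, Prod.mk.injEq]
        refine ⟨?_, ?_, ?_⟩ <;> · norm_num <;> omega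
      · by_cases h2 : p.2 = -1
        · simp only [List.foldl_cons, if_pos hne, if_neg h1, if_pos h2, ih, ht]
          simp only [List.count_cons, List.length_cons, h2, Prod.mk.injEq]
          refine ⟨?_, ?_, ?_⟩ <;> · norm_num <;> omega
        · simp only [List.foldl_cons, if_pos hne, if_neg h1, if_neg h2, ih, ht]
          simp only [List.count_cons, List.length_cons, Prod.mk.injEq]
          refine ⟨?_, ?_, ?_⟩ <;> · simp [h1, h2] <;> omega
    · have ht : pvTrans (p :: ps) = pvTrans ps := by simp [pvTrans, hne]
      simp only [List.foldl_cons, if_neg hne, ih, ht]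

-- the run starts after a leading element x
def pvF : Int → List Int → List Int
  | _, [] => []
  | prev, y :: t => if prev = y then pvF y t else y :: pvF y t

-- B's run-collapsing fold appends exactly the run starts after the current last element.
theorem pv_runs_fold :
    ∀ (l acc : List Int) (x : Int), acc.getLast? = some x →
      l.foldl
          (fun runs y => if runs = [] ∨ ¬ (runs.getLast? = some y) then runs ++ [y] else runs)
          acc
        = acc ++ pvF x l := by
  intro l
  induction l with
  | nil => intro acc x h; simp [pvF]
  | cons y t ih =>
    intro acc x h
    have hne : acc ≠ [] := by intro he; rw [he] at h; simp at h
    by_cases hxy : x = y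
    · have : ¬ (acc = [] ∨ ¬ (acc.getLast? = some y)) := by
        subst hxy; simp [hne, h]
      simp only [List.foldl_cons, if_neg this]
      rw [ih acc y (hxy ▸ h)]
      simp [pvF, hxy]
    · have : acc = [] ∨ ¬ (acc.getLast? = some y) := by
        right; rw [h]; simp [hxy]
      simp only [List.foldl_cons, if_pos this]
      rw [ih (acc ++ [y]) y (by simp)]
      simp [pvF, hxy]

-- transition targets of adjacent pairs = run starts after the head.
theorem pv_trans_eq_pvF : ∀ (l : List Int) (x : Int), pvTrans ((x :: l).zip l) = pvF x l := by
  intro l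
  induction l with
  | nil => intro x; rfl
  | cons y t ih =>
    intro x
    by_cases hxy : x = y
    · simp [pvTrans, pvF, hxy, ← ih y, pvTrans]
    · simp [pvTrans, pvF, hxy, ← ih y, pvTrans]

-- ===== VERDICT (by name: the statement is the Claim_ definition above) =====
theorem count_on_off_py_spec : Claim_equal_count_on_off_py := by
  intro cs _
  unfold Spec_count_on_off_py count_on_off_py count_on_off_py_alt
  have key := pv_loop_shift
    (fun acc v w =>
      if v ≠ w then
        if w = 1 then (acc.1 + 1, acc.2.1, acc.2.2)
        else if w = -1 then (acc.1, acc.2.1 + 1, acc.2.2)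
        else (acc.1, acc.2.1, acc.2.2 + 1)
      else acc)
    cs.length 0 cs (0, 0, 0) (by omega)
  simp only [Nat.cast_zero, List.drop_zero, Nat.zero_add, List.drop_one] at key
  rw [key, pv_fold_counts]
  cases cs with
  | nil => decide
  | cons x rest =>
    have hruns : (x :: rest).foldl
        (fun runs y => if runs = [] ∨ ¬ (runs.getLast? = some y) then runs ++ [y] else runs) []
        = [x] ++ pvF x rest := by
      simp only [List.foldl_cons]
      exact pv_runs_fold rest [x] x (by simp)
    simp only [hruns, PySem.List.slice_from_one, List.singleton_append, List.tail_cons,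
      PySem.Dict.foldl_insert_getD_add_one_eq_counter, PySem.Dict.getD_counter,
      List.tail_cons]
    rw [pv_trans_eq_pvF rest x]
    simp only [Prod.mk.injEq]
    refine ⟨by omega, by omega, by omega⟩
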